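-- pv_equiv track=rewrite | github.com/qcri/tasrif | tasrif/test_scripts/test_pipeline_SplitJoinOperator.py | process
-- ===== SOURCE A (Python) =====
-- def process(*args):
--     input_data = []
--     for arg in args[0]:
--         input_data.append(arg[0])
--     input_data = (list(zip(*input_data)))
--     output = []
--     for arg in input_data:
--         total = 0
--         for i in arg:
--             total += i
--         output.append(total)
--
--     return output
-- ===== SOURCE B (Python) =====
-- def process(*args):
--     rows = [arg[0] for arg in args[0]]
--     ncols = min((len(row) for row in rows), default=0)
--     output = [0] * ncols
--     for row in rows:
--         for j in range(ncols):
--             output[j] += row[j]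
--     return output
-- ===== Notes on version B (the rewrite author's own statement) =====
-- stated objective: alternative
-- what changed: B never materializes the transpose: it computes the minimum row length and accumulates column totals in-place in a single row-major pass over the extracted rows, instead of building zip(*rows) tuples and summing each.
import Mathlib
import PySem

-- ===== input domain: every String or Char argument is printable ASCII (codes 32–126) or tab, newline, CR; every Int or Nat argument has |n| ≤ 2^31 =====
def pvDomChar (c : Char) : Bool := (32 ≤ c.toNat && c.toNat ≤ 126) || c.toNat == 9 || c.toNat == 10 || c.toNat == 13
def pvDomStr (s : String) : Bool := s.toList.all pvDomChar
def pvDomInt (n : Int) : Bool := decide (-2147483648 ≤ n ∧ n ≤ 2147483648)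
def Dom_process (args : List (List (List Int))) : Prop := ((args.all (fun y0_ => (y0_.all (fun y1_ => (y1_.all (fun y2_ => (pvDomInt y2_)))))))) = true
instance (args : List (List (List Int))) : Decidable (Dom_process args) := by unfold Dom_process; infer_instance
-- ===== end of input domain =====

-- B computes the column sums in one row-major pass over an output array of length
-- min-row-length, instead of materializing the transpose with zip(*rows) and summing
-- each column list (alternative decomposition, same asymptotic cost).

-- ===== PORT A =====
-- zip(*input_data): peel one column (the heads) while every row is nonempty.
def pyZipStar (rows : List (List Int)) : List (List Int) :=
  if _h : rows ≠ [] ∧ rows.all (· ≠ []) then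
    rows.map (·.headI) :: pyZipStar (rows.map (·.tail))
  else []
termination_by rows.headI.length
decreasing_by
  obtain ⟨hne, hall⟩ := _h
  cases rows with
  | nil => exact absurd rfl hne
  | cons r rs =>
    have hr : r ≠ [] := by
      have := List.all_eq_true.mp hall r (by simp)
      simpa using this
    simp only [List.headI]
    cases r with
    | nil => exact absurd rfl hr
    | cons a t => simp

-- arg[0] is ported as List.headI (exact whenever arg ≠ [], which Pre_process ensures)
def process (args : List (List (List Int))) : List Int :=
  let input_data := args.foldl (fun acc arg => acc ++ [arg.headI]) []
  let input_data := pyZipStar input_data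
  input_data.foldl (fun out arg => out ++ [arg.foldl (fun t i => t + i) 0]) []

-- ===== PORT B =====
-- min(lengths, default=0): running minimum over the list of row lengths
def minLen (rows : List (List Int)) : Nat :=
  match rows.map List.length with
  | [] => 0
  | x :: xs => xs.foldl min x

def process_alt (args : List (List (List Int))) : List Int :=
  let rows := args.map (fun arg => arg.headI)
  let ncols := minLen rows
  let output := List.replicate ncols (0 : Int)
  rows.foldl (fun out row =>
    (List.range ncols).foldl (fun o j => o.set j (o.getD j 0 + row.getD j 0)) out) output

-- ===== PRECONDITION & SPEC =====
-- Pre_ excludes inputs where some element of args is the empty list: there Python A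
-- raises IndexError on arg[0] (and Python B raises too).
def Pre_process (args : List (List (List Int))) : Prop := ∀ arg ∈ args, arg ≠ []
instance (args : List (List (List Int))) : Decidable (Pre_process args) := by
  unfold Pre_process; infer_instance

def pvWitness_process : List (List (List Int)) := [[[1, 2]], [[3, 4], [5]]]

def Spec_process (args : List (List (List Int))) (out : List Int) : Prop := out = process_alt args
instance (args : List (List (List Int))) (out : List Int) : Decidable (Spec_process args out) := by unfold Spec_process; infer_instance

-- ===== CLAIM (what is proved, stated in full; the proofs are below) =====
def Claim_equal_process : Prop := ∀ (args : List (List (List Int))), Dom_process args → Pre_process args → Spec_process args (process args)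

-- ===== LEMMAS AND PROOFS =====

-- building a list by `acc ++ [f x]` in a foldl is mapping
theorem foldl_append_map {α β : Type} (xs : List α) (f : α → β) (init : List β) :
    xs.foldl (fun acc x => acc ++ [f x]) init = init ++ xs.map f := by
  induction xs generalizing init with
  | nil => simp
  | cons x t ih => simp [List.foldl_cons, ih]

theorem minLen_cons (r : List Int) (rs : List (List Int)) :
    minLen (r :: rs) = (rs.map List.length).foldl min r.length := by
  simp [minLen]

theorem foldl_min_le_self (l : List Nat) (x : Nat) : l.foldl min x ≤ x := by
  induction l generalizing x with
  | nil => simp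
  | cons c u ihu => exact le_trans (ihu (min x c)) (by omega)

theorem foldl_min_le_of_mem {x : Nat} {l : List Nat} {a : Nat} (h : a ∈ l) :
    l.foldl min x ≤ a := by
  induction l generalizing x with
  | nil => cases h
  | cons b t ih =>
    rcases List.mem_cons.mp h with rfl | h
    · exact le_trans (foldl_min_le_self t (min x a)) (by omega)
    · exact ih h

theorem minLen_le {rows : List (List Int)} {r : List Int} (h : r ∈ rows) :
    minLen rows ≤ r.length := by
  cases rows with
  | nil => cases h
  | cons s rs =>
    rw [minLen_cons]
    rcases List.mem_cons.mp h with rfl | h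
    · exact foldl_min_le_self _ _
    · exact foldl_min_le_of_mem (by simpa using List.mem_map_of_mem (f := List.length) h)

theorem foldl_min_sub_one (l : List Nat) (x : Nat) :
    (l.map (fun n => n - 1)).foldl min (x - 1) = l.foldl min x - 1 := by
  induction l generalizing x with
  | nil => simp
  | cons a t ih =>
    simp only [List.map_cons, List.foldl_cons]
    rw [show min (x - 1) (a - 1) = min x a - 1 by omega, ih]

theorem minLen_tails (rows : List (List Int)) :
    minLen (rows.map List.tail) = minLen rows - 1 := by
  cases rows with
  | nil => simp [minLen]
  | cons r rs =>
    rw [List.map_cons, minLen_cons, minLen_cons]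
    have : (rs.map List.tail).map List.length = (rs.map List.length).map (fun n => n - 1) := by
      simp [List.map_map]
    rw [this, List.length_tail, foldl_min_sub_one]

theorem minLen_pos {rows : List (List Int)} (hne : rows ≠ [])
    (hall : ∀ r ∈ rows, r ≠ []) : 1 ≤ minLen rows := by
  cases rows with
  | nil => exact absurd rfl hne
  | cons r rs =>
    rw [minLen_cons]
    have hstep : ∀ (l : List (List Int)) (x : Nat), 1 ≤ x → (∀ s ∈ l, s ≠ []) →
        1 ≤ (l.map List.length).foldl min x := by
      intro l; induction l with
      | nil => intro x hx _; simpa using hx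
      | cons s t ih =>
        intro x hx hl
        have hs : 1 ≤ s.length := by
          have := hl s (by simp)
          cases s with
          | nil => exact absurd rfl this
          | cons _ _ => simp
        simpa using ih (min x s.length) (by omega) (fun u hu => hl u (by simp [hu]))
    have hr : 1 ≤ r.length := by
      have := hall r (by simp)
      cases r with
      | nil => exact absurd rfl this
      | cons _ _ => simp
    exact hstep rs r.length hr (fun u hu => hall u (by simp [hu]))

theorem getD_tail (r : List Int) (j : Nat) : r.tail.getD j 0 = r.getD (j + 1) 0 := by
  cases r <;> simp [List.getD]

-- zip(*rows) described by indexing: column j collects entry j of every row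
theorem pyZipStar_char_aux (n : Nat) : ∀ (rows : List (List Int)), minLen rows = n →
    pyZipStar rows =
      (List.range n).map (fun j => rows.map (fun r => r.getD j 0)) := by
  induction n with
  | zero =>
    intro rows hn
    rw [pyZipStar]
    split
    · rename_i h
      obtain ⟨hne, hall⟩ := h
      have : 1 ≤ minLen rows := minLen_pos hne (fun r hr => by
        have := List.all_eq_true.mp hall r hr; simpa using this)
      omega
    · simp
  | succ n ih =>
    intro rows hn
    rw [pyZipStar]
    split
    · rename_i h
      obtain ⟨hne, hall⟩ := h
      have hall' : ∀ r ∈ rows, r ≠ [] := fun r hr => by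
        have := List.all_eq_true.mp hall r hr; simpa using this
      have hm : minLen (rows.map List.tail) = n := by
        rw [minLen_tails, hn]; omega
      rw [ih _ hm]
      rw [List.range_succ_eq_map, List.map_cons, List.map_map]
      congr 1
      · apply List.map_congr_left
        intro r hr
        have := hall' r hr
        cases r with
        | nil => exact absurd rfl this
        | cons a t => simp [List.getD, List.headI]
      · apply List.map_congr_left
        intro j _
        simp only [Function.comp, List.map_map]
        apply List.map_congr_left
        intro r _
        exact getD_tail r j
    · rename_i h
      rw [not_and_or] at h
      rcases h with h | h
      · simp at h; simp [h, minLen] at hn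
      · have : ∃ r ∈ rows, r = [] := by
          by_contra hc
          simp only [not_exists, not_and] at hc
          exact h (List.all_eq_true.mpr fun r hr => by simpa using hc r hr)
        obtain ⟨r, hr, hrnil⟩ := this
        have := minLen_le hr
        rw [hrnil, hn] at this
        simp at this

theorem pyZipStar_char (rows : List (List Int)) :
    pyZipStar rows =
      (List.range (minLen rows)).map (fun j => rows.map (fun r => r.getD j 0)) :=
  pyZipStar_char_aux (minLen rows) rows rfl

-- the inner `for j in range(n): output[j] += row[j]` on a list of shape map-over-range
theorem inner_gen (row : List Int) (n : Nat) (g : Nat → Int) (t : List Int) :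
    (List.range n).foldl (fun o j => o.set j (o.getD j 0 + row.getD j 0))
        ((List.range n).map g ++ t)
      = (List.range n).map (fun j => g j + row.getD j 0) ++ t := by
  induction n generalizing t with
  | zero => simp
  | succ n ih =>
    rw [List.range_succ]
    simp only [List.foldl_append, List.map_append, List.map_cons, List.map_nil,
      List.append_assoc]
    rw [ih ([g n] ++ t)]
    simp only [List.foldl_cons, List.foldl_nil]
    have hlen : ((List.range n).map (fun j => g j + row.getD j 0)).length = n := by simp
    rw [List.getD, List.getElem?_append_right (by simp), hlen]
    simp [List.getD]

theorem outer_char (rows : List (List Int)) (n : Nat) (g : Nat → Int) :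
    rows.foldl (fun out row =>
        (List.range n).foldl (fun o j => o.set j (o.getD j 0 + row.getD j 0)) out)
      ((List.range n).map g)
      = (List.range n).map (fun j => rows.foldl (fun t r => t + r.getD j 0) (g j)) := by
  induction rows generalizing g with
  | nil => simp
  | cons r rs ih =>
    rw [List.foldl_cons]
    have := inner_gen r n g []
    simp only [List.append_nil] at this
    rw [this, ih]
    simp

theorem process_alt_char (args : List (List (List Int))) :
    process_alt args =
      (List.range (minLen (args.map (fun arg => arg.headI)))).map
        (fun j => (args.map (fun arg => arg.headI)).foldl (fun t r => t + r.getD j 0) 0) := by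
  have h0 : process_alt args
      = (args.map (fun arg => arg.headI)).foldl (fun out row =>
          (List.range (minLen (args.map (fun arg => arg.headI)))).foldl
            (fun o j => o.set j (o.getD j 0 + row.getD j 0)) out)
        (List.replicate (minLen (args.map (fun arg => arg.headI))) (0 : Int)) := rfl
  rw [h0, show List.replicate (minLen (args.map (fun arg => arg.headI))) (0 : Int)
        = (List.range (minLen (args.map (fun arg => arg.headI)))).map (fun _ => 0) by
      simp [List.map_const'], outer_char]

-- ===== VERDICT (by name: the statement is the Claim_ definition above) =====
theorem process_spec : Claim_equal_process := by
  intro args _ _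
  unfold Spec_process process
  simp only [foldl_append_map, List.nil_append]
  rw [pyZipStar_char, process_alt_char, List.map_map]
  apply List.map_congr_left
  intro j _
  simp [Function.comp, List.foldl_map]
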